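-- pv_equiv track=rewrite | github.com/Evgeniy-Aleksiev/SoftUni | SoftUni/homework/advanced/2. tuples and sets/softuni_party.py | sorted_by_codes
-- ===== SOURCE A (Python) =====
-- def is_vip(guest):
--     return guest[0].isdigit()
--
-- def sorted_by_codes(guests):
--     vip_guests = []
--     regular_guests = []
--
--     for guest in guests:
--         if is_vip(guest):
--             vip_guests.append(guest)
--         else:
--             regular_guests.append(guest)
--
--     return sorted(vip_guests), sorted(regular_guests)
-- ===== SOURCE B (Python) =====
-- def sorted_by_codes(guests):
--     def split(xs):
--         if not xs:
--             return [], []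
--         if len(xs) == 1:
--             g = xs[0]
--             return ([g], []) if g[0].isdigit() else ([], [g])
--         mid = len(xs) // 2
--         lv, lr = split(xs[:mid])
--         rv, rr = split(xs[mid:])
--         return lv + rv, lr + rr
--
--     return split(sorted(guests))
-- ===== Notes on version B (the rewrite author's own statement) =====
-- stated objective: alternative
-- what changed: B sorts the whole list once and then partitions it by a divide-and-conquer recursive split (split halves, concatenate the buckets), instead of A's linear append-based partition loop followed by two separate sorts; sort stability makes the buckets identical.
import Mathlib
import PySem

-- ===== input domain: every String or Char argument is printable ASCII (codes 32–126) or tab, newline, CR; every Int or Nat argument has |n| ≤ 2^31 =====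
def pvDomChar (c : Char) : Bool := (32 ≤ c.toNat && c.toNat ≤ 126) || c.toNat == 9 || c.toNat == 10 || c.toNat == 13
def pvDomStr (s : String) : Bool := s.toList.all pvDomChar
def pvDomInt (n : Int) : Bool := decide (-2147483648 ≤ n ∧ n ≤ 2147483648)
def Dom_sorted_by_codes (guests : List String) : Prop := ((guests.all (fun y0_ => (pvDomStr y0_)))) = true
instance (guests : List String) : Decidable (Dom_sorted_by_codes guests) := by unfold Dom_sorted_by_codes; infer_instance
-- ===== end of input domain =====

-- B sorts the list once and partitions it by divide-and-conquer (vs A's linear partition loop then two sorts); return values proved equal.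

-- ===== PORT A =====
-- is_vip(guest): guest[0].isdigit(); guest[0] raises IndexError on "" (excluded by Pre_), so the `none` arm is unreachable there
def pvIsVip (guest : String) : Bool :=
  match PySem.Str.pyGet? guest 0 with
  | some c => PySem.Chars.isdigit c
  | none => false

def sorted_by_codes (guests : List String) : List String × List String :=
  let st := guests.foldl
    (fun (acc : List String × List String) guest =>
      if pvIsVip guest then (acc.1 ++ [guest], acc.2) else (acc.1, acc.2 ++ [guest]))
    ([], [])
  (PySem.List.sorted st.1 (fun x => x) false, PySem.List.sorted st.2 (fun x => x) false)

-- ===== PORT B =====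
-- split(xs): divide-and-conquer over the list; xs[:mid]/xs[mid:] are exactly take/drop here since 0 <= mid <= len(xs)
def pvSplit : List String → List String × List String
  | [] => ([], [])
  | [g] => if pvIsVip g then ([g], []) else ([], [g])
  | a :: b :: rest =>
    let mid := (a :: b :: rest).length / 2
    let l := pvSplit ((a :: b :: rest).take mid)
    let r := pvSplit ((a :: b :: rest).drop mid)
    (l.1 ++ r.1, l.2 ++ r.2)
termination_by xs => xs.length
decreasing_by
  · simp [List.length_take]; omega
  · simp [List.length_drop]; omega

def sorted_by_codes_alt (guests : List String) : List String × List String :=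
  pvSplit (PySem.List.sorted guests (fun x => x) false)

-- ===== PRECONDITION & SPEC =====
-- Pre_ excludes guest lists containing an empty string, on which Python's guest[0] raises IndexError (in both A and B).
def Pre_sorted_by_codes (guests : List String) : Prop := ∀ g ∈ guests, g ≠ ""
instance (guests : List String) : Decidable (Pre_sorted_by_codes guests) := by
  unfold Pre_sorted_by_codes; infer_instance

def pvWitness_sorted_by_codes : List String := ["7up", "alice", "Bob", "2fast"]

def Spec_sorted_by_codes (guests : List String) (out : List String × List String) : Prop := out = sorted_by_codes_alt guests
instance (guests : List String) (out : List String × List String) : Decidable (Spec_sorted_by_codes guests out) := by unfold Spec_sorted_by_codes; infer_instance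

-- ===== CLAIM (what is proved, stated in full; the proofs are below) =====
def Claim_equal_sorted_by_codes : Prop := ∀ (guests : List String), Dom_sorted_by_codes guests → Pre_sorted_by_codes guests → Spec_sorted_by_codes guests (sorted_by_codes guests)

-- ===== LEMMAS AND PROOFS =====

-- A's partition loop computes the two filters
theorem pvPartition_eq (xs : List String) :
    xs.foldl
      (fun (acc : List String × List String) guest =>
        if pvIsVip guest then (acc.1 ++ [guest], acc.2) else (acc.1, acc.2 ++ [guest]))
      ([], [])
    = (xs.filter pvIsVip, xs.filter (fun g => !pvIsVip g)) := by
  have h : (fun (acc : List String × List String) guest =>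
      if pvIsVip guest then (acc.1 ++ [guest], acc.2) else (acc.1, acc.2 ++ [guest]))
      = (fun (acc : List String × List String) guest =>
        ((fun a g => if pvIsVip g then a ++ [g] else a) acc.1 guest,
         (fun a g => if !pvIsVip g then a ++ [g] else a) acc.2 guest)) := by
    funext acc guest
    by_cases hg : pvIsVip guest <;> simp [hg]
  rw [h, PySem.List.foldl_prod_mk (f := fun a g => if pvIsVip g then a ++ [g] else a)
        (g := fun a g => if !pvIsVip g then a ++ [g] else a),
      PySem.List.foldl_append_if_eq_filter, PySem.List.foldl_append_if_eq_filter]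
  simp

-- B's divide-and-conquer split computes the same two filters
theorem pvSplit_eq (xs : List String) :
    pvSplit xs = (xs.filter pvIsVip, xs.filter (fun g => !pvIsVip g)) := by
  fun_induction pvSplit xs with
  | case1 => rfl
  | case2 g h => simp [h]
  | case3 g h => simp [h]
  | case4 a b rest mid l r ihl ihr =>
    have hf : ∀ p : String → Bool,
        (a :: b :: rest).filter p
          = ((a :: b :: rest).take mid).filter p ++ ((a :: b :: rest).drop mid).filter p := by
      intro p
      rw [← List.filter_append, List.take_append_drop]
    simp only [l, r, ihl, ihr, hf]

-- a stable sort commutes with filtering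
theorem pvSortedFilter (p : String → Bool) (xs : List String) :
    PySem.List.sorted (xs.filter p) (fun x => x) false
      = (PySem.List.sorted xs (fun x => x) false).filter p := by
  apply PySem.List.sorted_id_eq_of_perm_of_pairwise
  · exact ((PySem.List.sorted_perm xs (fun x => x) false).filter p)
  · exact (PySem.List.sorted_pairwise xs (fun x => x)).filter p

-- ===== VERDICT (by name: the statement is the Claim_ definition above) =====
theorem sorted_by_codes_spec : Claim_equal_sorted_by_codes := by
  intro guests _ _
  unfold Spec_sorted_by_codes sorted_by_codes sorted_by_codes_alt
  rw [pvPartition_eq, pvSplit_eq]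
  simp only
  rw [pvSortedFilter, pvSortedFilter]
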